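-- pv_equiv track=rewrite | github.com/davidd-pixel/riot-pr-desk | services/blog_library.py | _extract_title_from_seo_package
-- ===== SOURCE A (Python) =====
-- def _extract_title_from_seo_package(seo_package_text):
--     """Extract the title tag value from the SEO Package section."""
--     if not seo_package_text:
--         return ""
--     for line in seo_package_text.splitlines():
--         line = line.strip()
--         if line.lower().startswith("**title tag:**"):
--             title = line[len("**title tag:**"):].strip()
--             return title.strip("[]").strip()
--         if line.lower().startswith("title tag:"):
--             title = line[len("title tag:"):].strip()
--             return title.strip("[]").strip()
--     # Fall back to the first non-empty line
--     for line in seo_package_text.splitlines():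
--         line = line.strip()
--         if line:
--             return line[:80]
--     return ""
-- ===== SOURCE B (Python) =====
-- def _extract_title_from_seo_package(seo_package_text):
--     """Single pass: return title-tag value on first match, else remember first non-empty line."""
--     if not seo_package_text:
--         return ""
--     fallback = None
--     for raw in seo_package_text.splitlines():
--         line = raw.strip()
--         lowered = line.lower()
--         for prefix in ("**title tag:**", "title tag:"):
--             if lowered.startswith(prefix):
--                 return line[len(prefix):].strip().strip("[]").strip()
--         if fallback is None and line:
--             fallback = line
--     return fallback[:80] if fallback is not None else ""
-- ===== Notes on version B (the rewrite author's own statement) =====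
-- stated objective: simpler
-- what changed: Replaces A's two sequential scans over splitlines (one for a title-tag line, one for the first non-empty fallback) with a single pass that returns on a title-tag prefix match and records the first non-empty stripped line as a fallback, truncated to 80 chars only at the final return.
import Mathlib
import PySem

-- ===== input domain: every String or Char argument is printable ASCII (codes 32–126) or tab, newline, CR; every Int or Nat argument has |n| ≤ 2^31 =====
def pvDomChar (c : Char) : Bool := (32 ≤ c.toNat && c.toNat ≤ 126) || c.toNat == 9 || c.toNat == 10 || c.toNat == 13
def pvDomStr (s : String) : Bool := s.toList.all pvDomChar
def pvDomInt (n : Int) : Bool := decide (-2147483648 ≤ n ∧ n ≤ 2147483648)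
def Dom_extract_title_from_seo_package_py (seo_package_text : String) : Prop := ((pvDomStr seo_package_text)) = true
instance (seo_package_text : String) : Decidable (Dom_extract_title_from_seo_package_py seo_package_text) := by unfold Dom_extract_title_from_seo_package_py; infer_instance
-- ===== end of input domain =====

-- ===== PORT A =====
-- One honest line: B collapses A's two sequential scans of the lines into a single pass
-- that remembers the first non-empty line as a fallback (objective: simpler decomposition).

-- the title-tag parse 'line[k:].strip().strip("[]").strip()' shared by both branches of A
def pvParseTitle (line : String) (k : Int) : String :=
  PySem.Str.strip (PySem.Str.stripChars (PySem.Str.strip (PySem.Str.slice line (some k) none)) "[]")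

-- A's first loop: return the parsed title of the first line carrying a title-tag prefix
def pvA_scan1 : List String → Option String
  | [] => none
  | l :: ls =>
    let line := PySem.Str.strip l
    if PySem.Str.startswith (PySem.Str.lower line) "**title tag:**" then
      some (pvParseTitle line 14)
    else if PySem.Str.startswith (PySem.Str.lower line) "title tag:" then
      some (pvParseTitle line 10)
    else pvA_scan1 ls

-- A's second loop: first non-empty stripped line, truncated to 80 characters
def pvA_scan2 : List String → Option String
  | [] => none
  | l :: ls =>
    let line := PySem.Str.strip l
    if line ≠ "" then some (PySem.Str.slice line none (some 80)) else pvA_scan2 ls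

def extract_title_from_seo_package_py (seo_package_text : String) : String :=
  if seo_package_text = "" then ""
  else
    match pvA_scan1 (PySem.Str.splitlines seo_package_text) with
    | some t => t
    | none =>
      match pvA_scan2 (PySem.Str.splitlines seo_package_text) with
      | some t => t
      | none => ""

-- ===== PORT B =====
-- inner 'for prefix in (...)' of Source B
def pvB_match (line : String) : List String → Option String
  | [] => none
  | p :: ps =>
    if PySem.Str.startswith (PySem.Str.lower line) p then
      some (pvParseTitle line (PySem.Str.len p))
    else pvB_match line ps

-- Source B's single pass with the fallback accumulator
def pvB_loop : List String → Option String → String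
  | [], fb =>
    match fb with
    | some f => PySem.Str.slice f none (some 80)
    | none => ""
  | l :: ls, fb =>
    let line := PySem.Str.strip l
    match pvB_match line ["**title tag:**", "title tag:"] with
    | some t => t
    | none => pvB_loop ls (if fb = none ∧ line ≠ "" then some line else fb)

def extract_title_from_seo_package_py_alt (seo_package_text : String) : String :=
  if seo_package_text = "" then ""
  else pvB_loop (PySem.Str.splitlines seo_package_text) none

-- ===== PRECONDITION & SPEC =====
def Spec_extract_title_from_seo_package_py (seo_package_text : String) (out : String) : Prop := out = extract_title_from_seo_package_py_alt seo_package_text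
instance (seo_package_text : String) (out : String) : Decidable (Spec_extract_title_from_seo_package_py seo_package_text out) := by unfold Spec_extract_title_from_seo_package_py; infer_instance

-- ===== CLAIM (what is proved, stated in full; the proofs are below) =====
def Claim_equal_extract_title_from_seo_package_py : Prop := ∀ (seo_package_text : String), Dom_extract_title_from_seo_package_py seo_package_text → Spec_extract_title_from_seo_package_py seo_package_text (extract_title_from_seo_package_py seo_package_text)

-- ===== LEMMAS AND PROOFS =====

-- Source B's inner prefix loop unfolded: the two-prefix scan as A's nested ifs
theorem pvB_match_eq (line : String) :
    pvB_match line ["**title tag:**", "title tag:"] =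
      (if PySem.Str.startswith (PySem.Str.lower line) "**title tag:**" then
        some (pvParseTitle line 14)
      else if PySem.Str.startswith (PySem.Str.lower line) "title tag:" then
        some (pvParseTitle line 10)
      else none) := by
  rfl

-- the loop invariant: B's single pass equals A's two scans with the recorded fallback interposed
theorem pvB_loop_eq (ls : List String) (fb : Option String) :
    pvB_loop ls fb =
      (match pvA_scan1 ls with
      | some t => t
      | none =>
        match fb with
        | some f => PySem.Str.slice f none (some 80)
        | none => (pvA_scan2 ls).getD "") := by
  induction ls generalizing fb with
  | nil => cases fb <;> simp [pvB_loop, pvA_scan1, pvA_scan2]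
  | cons l ls ih =>
    cases fb <;>
    · simp only [pvB_loop, pvA_scan1, pvA_scan2, pvB_match_eq]
      split_ifs <;> simp_all [ih]

-- ===== VERDICT (by name: the statement is the Claim_ definition above) =====
theorem extract_title_from_seo_package_py_spec : Claim_equal_extract_title_from_seo_package_py := by
  intro s _
  unfold Spec_extract_title_from_seo_package_py
  unfold extract_title_from_seo_package_py extract_title_from_seo_package_py_alt
  by_cases hs : s = ""
  · simp [hs]
  · simp only [hs, if_false, pvB_loop_eq]
    cases h1 : pvA_scan1 (PySem.Str.splitlines s) with
    | some t => simp
    | none => cases h2 : pvA_scan2 (PySem.Str.splitlines s) <;> simp
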